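-- pv_equiv track=rewrite | github.com/geraud-g/advent-of-code | aoc_2016/day_07/day_07.py | support_tls
-- ===== SOURCE A (Python) =====
-- Supernet = tuple[str, ...]
--
-- def support_tls(supernet: Supernet) -> bool:
--     for chunk in supernet:
--         for idx in range(len(chunk) - 3):
--             first_pair = chunk[idx] + chunk[idx + 1]
--             if first_pair[0] == first_pair[1]:
--                 continue
--             second_pair = chunk[idx + 3] + chunk[idx + 2]
--             if first_pair == second_pair:
--                 return True
--             idx += 1
--     return False
-- ===== SOURCE B (Python) =====
-- import re
--
-- # ABBA: a char, a different char, then the second and the first again (backreferences).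
-- _ABBA = re.compile(r'([\s\S])((?!\1)[\s\S])\2\1')
--
--
-- def support_tls(supernet):
--     return any(_ABBA.search(chunk) for chunk in supernet)
-- ===== Notes on version B (the rewrite author's own statement) =====
-- stated objective: idiomatic
-- what changed: Replaced the explicit nested index loop with a precompiled regex with backreferences and a distinctness lookahead; the regex engine performs the window search inside each chunk.
import Mathlib
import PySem

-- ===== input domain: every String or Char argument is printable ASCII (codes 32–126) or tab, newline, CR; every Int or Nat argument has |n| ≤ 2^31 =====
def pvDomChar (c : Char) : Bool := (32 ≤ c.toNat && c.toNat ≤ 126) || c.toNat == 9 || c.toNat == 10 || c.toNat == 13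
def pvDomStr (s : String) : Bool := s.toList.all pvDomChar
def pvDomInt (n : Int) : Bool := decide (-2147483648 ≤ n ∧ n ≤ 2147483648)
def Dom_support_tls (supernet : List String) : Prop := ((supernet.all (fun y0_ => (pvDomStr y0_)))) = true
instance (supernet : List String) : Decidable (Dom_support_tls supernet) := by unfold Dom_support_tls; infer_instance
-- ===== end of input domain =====

-- B replaces A's explicit nested index loop by a search with a backreference regex ([\s\S])((?!\1)[\s\S])\2\1 per chunk (idiomatic; same cost).


-- ===== PORT A =====
-- one iteration of A's inner loop at index idx: 'continue' when the two first chars are equal,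
-- 'return True' when first_pair == second_pair (chars reversed); early exit = any
def pvIterA (cs : List Char) (idx : Nat) : Bool :=
  let a := cs.getD idx ' '
  let b := cs.getD (idx + 1) ' '
  if a == b then false
  else a == cs.getD (idx + 3) ' ' && b == cs.getD (idx + 2) ' '

-- for idx in range(len(chunk) - 3): …  (indices are always in range, so getD is exact)
def pvChunkA (cs : List Char) : Bool :=
  (List.range (cs.length - 3)).any (pvIterA cs)

def support_tls (supernet : List String) : Bool :=
  supernet.any (fun chunk => pvChunkA chunk.toList)

-- ===== PORT B =====
-- hand port of the fixed regex r'([\s\S])((?!\1)[\s\S])\2\1': exact for this pattern.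
-- pvMatchAt: whether the pattern matches anchored at the start of the list, in the
-- pattern's own order: group 1 takes a; group 2 takes b with the lookahead b ≠ a;
-- then backreference \2 must equal the third char and \1 the fourth.
def pvMatchAt (cs : List Char) : Bool :=
  match cs with
  | a :: b :: c :: d :: _ => !(b == a) && (c == b) && (d == a)
  | _ => false

-- re.search: try the anchored match at each successive start position (leftmost first)
def pvSearch : List Char → Bool
  | [] => false
  | c :: t => pvMatchAt (c :: t) || pvSearch t

def support_tls_alt (supernet : List String) : Bool :=
  supernet.any (fun chunk => pvSearch chunk.toList)

-- ===== PRECONDITION & SPEC =====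
def Spec_support_tls (supernet : List String) (out : Bool) : Prop := out = support_tls_alt supernet
instance (supernet : List String) (out : Bool) : Decidable (Spec_support_tls supernet out) := by unfold Spec_support_tls; infer_instance

-- ===== CLAIM (what is proved, stated in full; the proofs are below) =====
def Claim_equal_support_tls : Prop := ∀ (supernet : List String), Dom_support_tls supernet → Spec_support_tls supernet (support_tls supernet)

-- ===== LEMMAS AND PROOFS =====

-- common characterisation: "some window a b c d with a = d, b = c, a ≠ b"
def pvAbba : List Char → Bool
  | a :: b :: c :: d :: t =>
      ((a == d && b == c && !(a == b)) || pvAbba (b :: c :: d :: t))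
  | _ => false

theorem pvIterA_shift (x : Char) (l : List Char) (i : Nat) :
    pvIterA (x :: l) (i + 1) = pvIterA l i := by
  simp [pvIterA, List.getD]

theorem pvChunkA_eq_abba : ∀ cs : List Char, pvChunkA cs = pvAbba cs := by
  intro cs
  induction cs with
  | nil => rfl
  | cons a rest ih =>
    match rest with
    | [] => rfl
    | [b] => rfl
    | [b, c] => rfl
    | b :: c :: d :: t =>
      have hlen : (a :: b :: c :: d :: t).length - 3 = t.length + 1 := by
        simp [List.length]
      unfold pvChunkA
      rw [hlen, List.range_succ_eq_map, List.any_cons, List.any_map]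
      have h1 : (List.range t.length).any (pvIterA (a :: b :: c :: d :: t) ∘ Nat.succ)
          = (List.range t.length).any (pvIterA (b :: c :: d :: t)) :=
        List.any_congr rfl (fun i => by
          show pvIterA (a :: b :: c :: d :: t) (i + 1) = _
          exact pvIterA_shift a _ i)
      have h2 : (List.range t.length).any (pvIterA (b :: c :: d :: t))
          = pvChunkA (b :: c :: d :: t) := by
        unfold pvChunkA; simp [List.length]
      rw [h1, h2, ih]
      show ((if a == b then false else a == d && b == c) || pvAbba (b :: c :: d :: t))
            = pvAbba (a :: b :: c :: d :: t)
      conv_rhs => rw [pvAbba]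
      congr 1
      cases hab : a == b <;> simp [hab]

theorem pvWindowCond (a b c d : Char) :
    (!(b == a) && (c == b) && (d == a)) = (a == d && b == c && !(a == b)) := by
  rw [Bool.eq_iff_iff]
  simp only [Bool.and_eq_true, Bool.not_eq_true', beq_eq_false_iff_ne, beq_iff_eq]
  constructor
  · rintro ⟨⟨h1, h2⟩, h3⟩
    exact ⟨⟨h3.symm, h2.symm⟩, fun h => h1 h.symm⟩
  · rintro ⟨⟨h1, h2⟩, h3⟩
    exact ⟨⟨fun h => h3 h.symm, h2.symm⟩, h1.symm⟩

theorem pvSearch_eq_abba : ∀ cs : List Char, pvSearch cs = pvAbba cs := by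
  intro cs
  induction cs with
  | nil => rfl
  | cons a rest ih =>
    match rest with
    | [] => simp [pvSearch, pvMatchAt, pvAbba]
    | [b] => simp [pvSearch, pvMatchAt, pvAbba]
    | [b, c] => simp [pvSearch, pvMatchAt, pvAbba]
    | b :: c :: d :: t =>
      show (pvMatchAt (a :: b :: c :: d :: t) || pvSearch (b :: c :: d :: t))
            = pvAbba (a :: b :: c :: d :: t)
      rw [ih]
      conv_rhs => rw [pvAbba]
      congr 1
      exact pvWindowCond a b c d

-- ===== VERDICT (by name: the statement is the Claim_ definition above) =====
theorem support_tls_spec : Claim_equal_support_tls := by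
  intro supernet _
  unfold Spec_support_tls support_tls support_tls_alt
  exact List.any_congr rfl (fun chunk => by
    rw [pvChunkA_eq_abba, pvSearch_eq_abba])
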